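-- pv_equiv track=rewrite | github.com/AjeeAI/mols-otp | Finalized code for project(Updated).py | is_mols
-- ===== SOURCE A (Python) =====
-- def is_mols(latin_square1, latin_square2):
--     size = len(latin_square1)
--     pairs = set()
--     for i in range(size):
--         for j in range(size):
--             pair = (latin_square1[i][j], latin_square2[i][j])
--             if pair in pairs:
--                 return False
--             pairs.add(pair)
--     return True
-- ===== SOURCE B (Python) =====
-- def is_mols(latin_square1, latin_square2):
--     size = len(latin_square1)
--     cells = sorted((latin_square1[i][j], latin_square2[i][j])
--                    for i in range(size) for j in range(size))
--     return all(p != q for p, q in zip(cells, cells[1:]))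
-- ===== Notes on version B (the rewrite author's own statement) =====
-- stated objective: alternative
-- what changed: B detects a repeated superimposed pair by sorting the list of all pairs and scanning adjacent elements for equality, instead of A's hash-set insert-with-membership-test and early return.
-- outside the precondition, e.g. on is_mols([[1, 1], [2]], [[3, 3], [4]]): A returns False, B raises IndexError
import Mathlib
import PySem

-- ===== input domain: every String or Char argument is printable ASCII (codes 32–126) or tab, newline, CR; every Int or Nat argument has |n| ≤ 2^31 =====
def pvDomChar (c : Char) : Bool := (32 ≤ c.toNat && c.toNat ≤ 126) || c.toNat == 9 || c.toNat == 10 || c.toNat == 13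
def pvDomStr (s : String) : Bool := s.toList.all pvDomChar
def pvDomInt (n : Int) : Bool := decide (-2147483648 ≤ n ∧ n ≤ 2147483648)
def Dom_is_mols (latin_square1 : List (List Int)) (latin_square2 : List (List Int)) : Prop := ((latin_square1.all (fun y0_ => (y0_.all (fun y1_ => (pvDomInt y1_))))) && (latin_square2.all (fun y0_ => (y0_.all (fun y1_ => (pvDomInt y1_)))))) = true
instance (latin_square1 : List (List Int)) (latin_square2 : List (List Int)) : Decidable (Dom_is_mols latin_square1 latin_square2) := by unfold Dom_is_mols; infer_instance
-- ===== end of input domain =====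

-- B replaces A's hash-set insert-with-membership-test loop (early return on a repeated pair) by
-- sorting the list of all superimposed pairs and scanning adjacent elements for a duplicate.

-- ===== PORT A =====
-- (latin_square1[i][j], latin_square2[i][j]) in Python's evaluation order; none = IndexError
def pvPairA (ls1 ls2 : List (List Int)) (i j : Int) : Option (Int × Int) :=
  match PySem.List.pyGet? ls1 i with
  | none => none
  | some r1 =>
    match PySem.List.pyGet? r1 j with
    | none => none
    | some a =>
      match PySem.List.pyGet? ls2 i with
      | none => none
      | some r2 =>
        match PySem.List.pyGet? r2 j with
        | none => none
        | some b => some (a, b)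

-- inner 'for j' loop: none = IndexError, some none = 'return False', some (some pairs) = fell through
def pvInnerA (ls1 ls2 : List (List Int)) (i : Int) :
    List Int → PySem.Set (Int × Int) → Option (Option (PySem.Set (Int × Int)))
  | [], pairs => some (some pairs)
  | j :: js, pairs =>
    match pvPairA ls1 ls2 i j with
    | none => none
    | some p =>
      if PySem.Set.contains pairs p then some none
      else pvInnerA ls1 ls2 i js (PySem.Set.add pairs p)

-- outer 'for i' loop, same encoding
def pvOuterA (ls1 ls2 : List (List Int)) (js : List Int) :
    List Int → PySem.Set (Int × Int) → Option (Option (PySem.Set (Int × Int)))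
  | [], pairs => some (some pairs)
  | i :: is', pairs =>
    match pvInnerA ls1 ls2 i js pairs with
    | none => none
    | some none => some none
    | some (some pairs') => pvOuterA ls1 ls2 js is' pairs'

def is_mols (latin_square1 : List (List Int)) (latin_square2 : List (List Int)) : Bool :=
  let size : Int := latin_square1.length
  match pvOuterA latin_square1 latin_square2 (PySem.List.pyRange 0 size 1)
      (PySem.List.pyRange 0 size 1) PySem.Set.empty with
  | some none => false      -- 'return False'
  | _ => true               -- loop completed → 'return True'; the 'none' (IndexError) case is outside Pre_

-- ===== PORT B =====
-- one generator element, in Python's evaluation order; none = IndexError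
def pvPairB (ls1 ls2 : List (List Int)) (ij : Int × Int) : Option (Int × Int) :=
  (PySem.List.pyGet? ls1 ij.1).bind fun r1 =>
  (PySem.List.pyGet? r1 ij.2).bind fun a =>
  (PySem.List.pyGet? ls2 ij.1).bind fun r2 =>
  (PySem.List.pyGet? r2 ij.2).map fun b => (a, b)

-- all(p != q for p, q in zip(cells, cells[1:])): adjacent-pair scan of the sorted list
def pvAdjB : List (Int × Int) → Bool
  | [] => true
  | [_] => true
  | p :: q :: t => (p != q) && pvAdjB (q :: t)

def is_mols_alt (latin_square1 : List (List Int)) (latin_square2 : List (List Int)) : Bool :=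
  let size : Int := latin_square1.length
  let rng := PySem.List.pyRange 0 size 1
  match (rng.flatMap fun i => rng.map fun j => (i, j)).mapM
      (pvPairB latin_square1 latin_square2) with
  | none => true            -- IndexError, outside Pre_
  | some cells => pvAdjB (PySem.List.sorted2 cells Prod.fst Prod.snd)   -- sorted(...) on tuples = lexicographic

-- ===== PRECONDITION & SPEC =====
-- Pre_ excludes exactly the ragged inputs on which B's full pass raises IndexError;
-- A raises there too unless a repeated pair happens to occur before the bad access (then A returns False).
def Pre_is_mols (latin_square1 : List (List Int)) (latin_square2 : List (List Int)) : Prop :=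
  latin_square1.length ≤ latin_square2.length ∧
  (∀ row ∈ latin_square1, latin_square1.length ≤ row.length) ∧
  (∀ row ∈ latin_square2.take latin_square1.length, latin_square1.length ≤ row.length)
instance (latin_square1 : List (List Int)) (latin_square2 : List (List Int)) : Decidable (Pre_is_mols latin_square1 latin_square2) := by unfold Pre_is_mols; infer_instance

def pvWitness_is_mols : List (List Int) × List (List Int) :=
  ([[0, 1], [1, 0]], [[0, 1], [1, 0]])

def Spec_is_mols (latin_square1 : List (List Int)) (latin_square2 : List (List Int)) (out : Bool) : Prop := out = is_mols_alt latin_square1 latin_square2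
instance (latin_square1 : List (List Int)) (latin_square2 : List (List Int)) (out : Bool) : Decidable (Spec_is_mols latin_square1 latin_square2 out) := by unfold Spec_is_mols; infer_instance

-- ===== CLAIM (what is proved, stated in full; the proofs are below) =====
def Claim_equal_is_mols : Prop := ∀ (latin_square1 : List (List Int)) (latin_square2 : List (List Int)), Dom_is_mols latin_square1 latin_square2 → Pre_is_mols latin_square1 latin_square2 → Spec_is_mols latin_square1 latin_square2 (is_mols latin_square1 latin_square2)

-- ===== LEMMAS AND PROOFS =====

-- the value of both programs' pair at (i, j), total form (only used under Pre_)
def pvG (ls1 ls2 : List (List Int)) (i j : Int) : Int × Int :=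
  (PySem.List.pyGetD (PySem.List.pyGetD ls1 i []) j 0,
   PySem.List.pyGetD (PySem.List.pyGetD ls2 i []) j 0)

-- proof-side scan for A: none = a duplicate was hit
def pvScan : List (Int × Int) → PySem.Set (Int × Int) → Option (PySem.Set (Int × Int))
  | [], s => some s
  | p :: ps, s => if PySem.Set.contains s p then none else pvScan ps (PySem.Set.add s p)

theorem pvScan_isSome (L : List (Int × Int)) :
    ∀ s : PySem.Set (Int × Int),
      (pvScan L s).isSome = true ↔ L.Nodup ∧ ∀ p ∈ L, p ∉ s := by
  induction L with
  | nil => intro s; simp [pvScan]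
  | cons p ps ih =>
    intro s
    by_cases hp : p ∈ s
    · have hc : PySem.Set.contains s p = true := (PySem.Set.contains_iff s p).2 hp
      simp only [pvScan, hc, if_pos]
      simp only [Option.isSome_none, Bool.false_eq_true, false_iff]
      rintro ⟨hnd, hmem⟩
      exact hmem p (by simp) hp
    · have hc : PySem.Set.contains s p = false := by
        cases h : PySem.Set.contains s p
        · rfl
        · exact absurd ((PySem.Set.contains_iff s p).1 h) hp
      simp only [pvScan, hc, Bool.false_eq_true, ite_false]
      rw [ih (PySem.Set.add s p)]
      constructor
      · rintro ⟨hnd, hmem⟩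
        have hnp : p ∉ ps := fun hps => by
          have := hmem p hps
          rw [PySem.Set.mem_add] at this
          exact this (Or.inr rfl)
        refine ⟨List.nodup_cons.2 ⟨hnp, hnd⟩, ?_⟩
        intro q hq
        rcases List.mem_cons.1 hq with h | h
        · subst h; exact hp
        · intro hqs
          exact hmem q h (by rw [PySem.Set.mem_add]; exact Or.inl hqs)
      · rintro ⟨hnd, hmem⟩
        have hnd' := List.nodup_cons.1 hnd
        refine ⟨hnd'.2, ?_⟩
        intro q hq hqadd
        rw [PySem.Set.mem_add] at hqadd
        rcases hqadd with h | h
        · exact hmem q (List.mem_cons_of_mem _ hq) h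
        · subst h; exact hnd'.1 hq

theorem pvScan_append (L1 L2 : List (Int × Int)) :
    ∀ s, pvScan (L1 ++ L2) s = (pvScan L1 s).bind (pvScan L2) := by
  induction L1 with
  | nil => intro s; simp [pvScan]
  | cons p ps ih =>
    intro s
    simp only [List.cons_append, pvScan]
    split
    · rfl
    · exact ih _

theorem pvInnerA_eq (ls1 ls2 : List (List Int)) (i : Int) (js : List Int)
    (h : ∀ j ∈ js, pvPairA ls1 ls2 i j = some (pvG ls1 ls2 i j)) :
    ∀ s, pvInnerA ls1 ls2 i js s = some (pvScan (js.map (pvG ls1 ls2 i)) s) := by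
  induction js with
  | nil => intro s; simp [pvInnerA, pvScan]
  | cons j js ih =>
    intro s
    have hj := h j (by simp)
    simp only [pvInnerA, hj, List.map_cons, pvScan]
    split
    · rfl
    · exact ih (fun j' hj' => h j' (List.mem_cons_of_mem _ hj')) _

theorem pvOuterA_eq (ls1 ls2 : List (List Int)) (js : List Int) (is' : List Int)
    (h : ∀ i ∈ is', ∀ j ∈ js, pvPairA ls1 ls2 i j = some (pvG ls1 ls2 i j)) :
    ∀ s, pvOuterA ls1 ls2 js is' s =
      some (pvScan (is'.flatMap fun i => js.map (pvG ls1 ls2 i)) s) := by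
  induction is' with
  | nil => intro s; simp [pvOuterA, pvScan]
  | cons i is' ih =>
    intro s
    rw [List.flatMap_cons, pvScan_append]
    simp only [pvOuterA, pvInnerA_eq ls1 ls2 i js (h i (by simp)) s]
    cases hsc : pvScan (js.map (pvG ls1 ls2 i)) s with
    | none => rfl
    | some s' => exact ih (fun i' hi' => h i' (List.mem_cons_of_mem _ hi')) s'

theorem pv_mapM_eq_some {α β : Type} (f : α → Option β) (h' : α → β) (xs : List α)
    (h : ∀ x ∈ xs, f x = some (h' x)) : xs.mapM f = some (xs.map h') := by
  induction xs with
  | nil => rfl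
  | cons x xs ih =>
    rw [List.mapM_cons, h x (by simp), ih (fun y hy => h y (List.mem_cons_of_mem _ hy))]
    rfl

-- under Pre_, both programs' pair lookup succeeds with value pvG
theorem pvPairA_some (ls1 ls2 : List (List Int)) (hpre : Pre_is_mols ls1 ls2)
    (i j : Int) (hi0 : 0 ≤ i) (hin : i < (ls1.length : Int))
    (hj0 : 0 ≤ j) (hjn : j < (ls1.length : Int)) :
    pvPairA ls1 ls2 i j = some (pvG ls1 ls2 i j) := by
  obtain ⟨h2, h1, h2r⟩ := hpre
  obtain ⟨a, ha⟩ : ∃ a : Nat, i = (a : Int) := ⟨i.toNat, (Int.toNat_of_nonneg hi0).symm⟩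
  obtain ⟨b, hb⟩ : ∃ b : Nat, j = (b : Int) := ⟨j.toNat, (Int.toNat_of_nonneg hj0).symm⟩
  subst ha; subst hb
  have han : a < ls1.length := by exact_mod_cast hin
  have hbn : b < ls1.length := by exact_mod_cast hjn
  have hr1 : PySem.List.pyGet? ls1 (a : Int) = some ls1[a] := by
    rw [PySem.List.pyGet?_natCast]; simp [List.getElem?_eq_getElem han]
  have hrow1 : b < ls1[a].length := lt_of_lt_of_le hbn (h1 _ (ls1.getElem_mem han))
  have ha2 : a < ls2.length := lt_of_lt_of_le han h2
  have hr2 : PySem.List.pyGet? ls2 (a : Int) = some ls2[a] := by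
    rw [PySem.List.pyGet?_natCast]; simp [List.getElem?_eq_getElem ha2]
  have hrow2 : b < ls2[a].length := by
    refine lt_of_lt_of_le hbn (h2r _ ?_)
    rw [List.mem_take_iff_getElem]
    exact ⟨a, by omega, rfl⟩
  have hv1 : PySem.List.pyGet? ls1[a] (b : Int) = some ls1[a][b] := by
    rw [PySem.List.pyGet?_natCast]; simp [List.getElem?_eq_getElem hrow1]
  have hv2 : PySem.List.pyGet? ls2[a] (b : Int) = some ls2[a][b] := by
    rw [PySem.List.pyGet?_natCast]; simp [List.getElem?_eq_getElem hrow2]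
  have g1 : PySem.List.pyGetD ls1 (a : Int) [] = ls1[a] := by
    simp [PySem.List.pyGetD, hr1]
  have g2 : PySem.List.pyGetD ls2 (a : Int) [] = ls2[a] := by
    simp [PySem.List.pyGetD, hr2]
  simp only [pvPairA, hr1, hv1, hr2, hv2]
  simp [pvG, g1, g2, List.getElem?_eq_getElem hrow1, List.getElem?_eq_getElem hrow2]

theorem pvPairB_some (ls1 ls2 : List (List Int)) (hpre : Pre_is_mols ls1 ls2)
    (i j : Int) (hi0 : 0 ≤ i) (hin : i < (ls1.length : Int))
    (hj0 : 0 ≤ j) (hjn : j < (ls1.length : Int)) :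
    pvPairB ls1 ls2 (i, j) = some (pvG ls1 ls2 i j) := by
  have heq : pvPairB ls1 ls2 (i, j) = pvPairA ls1 ls2 i j := by
    cases h1 : PySem.List.pyGet? ls1 i with
    | none => simp [pvPairB, pvPairA, h1]
    | some r1 =>
      cases h2 : PySem.List.pyGet? r1 j with
      | none => simp [pvPairB, pvPairA, h1, h2]
      | some a =>
        cases h3 : PySem.List.pyGet? ls2 i with
        | none => simp [pvPairB, pvPairA, h1, h2, h3]
        | some r2 =>
          cases h4 : PySem.List.pyGet? r2 j with
          | none => simp [pvPairB, pvPairA, h1, h2, h3, h4]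
          | some b => simp [pvPairB, pvPairA, h1, h2, h3, h4]
  rw [heq]
  exact pvPairA_some ls1 ls2 hpre i j hi0 hin hj0 hjn

-- ---- sortedness of sorted2 and the adjacent-scan characterisation ----

-- the exact comparison sorted2 uses for k1 = fst, k2 = snd: Python's lexicographic tuple '<'
def pvLexLt (a b : Int × Int) : Bool :=
  decide (a.1 < b.1) || (!decide (b.1 < a.1) && decide (a.2 < b.2))

theorem pvLexLt_iff (a b : Int × Int) :
    pvLexLt a b = true ↔ a.1 < b.1 ∨ (a.1 = b.1 ∧ a.2 < b.2) := by
  simp [pvLexLt]; omega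

theorem pv_insertBy_pairwise (x : Int × Int) (ys : List (Int × Int))
    (h : ys.Pairwise (fun a b => pvLexLt b a = false)) :
    (PySem.List.insertBy pvLexLt x ys).Pairwise (fun a b => pvLexLt b a = false) := by
  induction ys with
  | nil => simp [PySem.List.insertBy]
  | cons y ys ih =>
    have h' := List.pairwise_cons.1 h
    by_cases hxy : pvLexLt x y = true
    · rw [PySem.List.insertBy, if_pos hxy]
      refine List.pairwise_cons.2 ⟨?_, h⟩
      intro z hz
      rcases List.mem_cons.1 hz with rfl | hz'
      · rw [pvLexLt_iff] at hxy
        cases hzx : pvLexLt z x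
        · rfl
        · rw [pvLexLt_iff] at hzx; omega
      · have hzy := h'.1 z hz'
        cases hzx : pvLexLt z x
        · rfl
        · exfalso
          rw [pvLexLt_iff] at hxy hzx
          have : pvLexLt z y = true := by rw [pvLexLt_iff]; omega
          rw [this] at hzy; exact Bool.true_eq_false.mp hzy
    · rw [PySem.List.insertBy, if_neg hxy]
      refine List.pairwise_cons.2 ⟨?_, ih h'.2⟩
      intro z hz
      rcases (PySem.List.mem_insertBy pvLexLt x z ys).1 hz with rfl | hz'
      · exact Bool.not_eq_true _ |>.mp hxy
      · exact h'.1 z hz'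

theorem pv_foldl_insertBy_pairwise (L : List (Int × Int)) :
    ∀ acc, acc.Pairwise (fun a b => pvLexLt b a = false) →
      (L.foldl (fun acc x => PySem.List.insertBy pvLexLt x acc) acc).Pairwise
        (fun a b => pvLexLt b a = false) := by
  induction L with
  | nil => intro acc h; simpa using h
  | cons x xs ih =>
    intro acc h
    exact ih _ (pv_insertBy_pairwise x acc h)

theorem pv_sorted2_pairwise (L : List (Int × Int)) :
    (PySem.List.sorted2 L Prod.fst Prod.snd).Pairwise (fun a b => pvLexLt b a = false) := by
  have : PySem.List.sorted2 L Prod.fst Prod.snd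
      = L.foldl (fun acc x => PySem.List.insertBy pvLexLt x acc) [] := rfl
  rw [this]
  exact pv_foldl_insertBy_pairwise L [] (by simp)

-- the adjacent scan of a weakly sorted list detects exactly the duplicates
theorem pvLexLt_false_iff (a b : Int × Int) :
    pvLexLt a b = false ↔ ¬ (a.1 < b.1 ∨ (a.1 = b.1 ∧ a.2 < b.2)) := by
  rw [← Bool.not_eq_true, pvLexLt_iff]

theorem pvAdjB_iff_nodup (S : List (Int × Int))
    (hs : S.Pairwise (fun a b => pvLexLt b a = false)) :
    pvAdjB S = true ↔ S.Nodup := by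
  induction S with
  | nil => simp [pvAdjB]
  | cons p S ih =>
    cases S with
    | nil => simp [pvAdjB]
    | cons q t =>
      have h' := List.pairwise_cons.1 hs
      have hih := ih h'.2
      have h'' := List.pairwise_cons.1 h'.2
      constructor
      · intro hadj
        simp only [pvAdjB, Bool.and_eq_true, bne_iff_ne] at hadj
        refine List.nodup_cons.2 ⟨?_, hih.1 hadj.2⟩
        intro hmem
        rcases List.mem_cons.1 hmem with rfl | hpt
        · exact hadj.1 rfl
        · have h1 : pvLexLt p q = false := h''.1 p hpt
          have h2 : pvLexLt q p = false := h'.1 q List.mem_cons_self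
          rw [pvLexLt_false_iff] at h1 h2
          exact hadj.1 (Prod.ext (by omega) (by omega))
      · intro hnd
        have hnd' := List.nodup_cons.1 hnd
        simp only [pvAdjB, Bool.and_eq_true, bne_iff_ne]
        exact ⟨fun h => hnd'.1 (h ▸ List.mem_cons_self), hih.2 hnd'.2⟩

theorem is_mols_spec_aux (ls1 ls2 : List (List Int)) (hpre : Pre_is_mols ls1 ls2) :
    is_mols ls1 ls2 = is_mols_alt ls1 ls2 := by
  set n : Int := (ls1.length : Int) with hn
  set rng := PySem.List.pyRange 0 n 1 with hrng
  have hmem : ∀ x ∈ rng, 0 ≤ x ∧ x < n := by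
    intro x hx
    have := PySem.List.mem_pyRange_one.1 hx
    omega
  set L : List (Int × Int) := rng.flatMap (fun i => rng.map (pvG ls1 ls2 i)) with hL
  -- A's side
  have hA : is_mols ls1 ls2 = (pvScan L PySem.Set.empty).isSome := by
    rw [is_mols]
    rw [pvOuterA_eq ls1 ls2 rng rng
      (fun i hi j hj => pvPairA_some ls1 ls2 hpre i j (hmem i hi).1 (hmem i hi).2
        (hmem j hj).1 (hmem j hj).2) PySem.Set.empty]
    rw [← hL]
    cases h : pvScan L PySem.Set.empty with
    | none => rfl
    | some s => rfl
  -- B's side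
  have hmapM : (rng.flatMap fun i => rng.map fun j => (i, j)).mapM (pvPairB ls1 ls2)
      = some L := by
    rw [pv_mapM_eq_some (pvPairB ls1 ls2) (fun ij => pvG ls1 ls2 ij.1 ij.2) _ ?_]
    · refine congrArg some ?_
      rw [hL, List.map_flatMap]
      congr 1
      funext i
      rw [List.map_map]
      rfl
    · intro ij hij
      rw [List.mem_flatMap] at hij
      obtain ⟨i, hi, hij'⟩ := hij
      rw [List.mem_map] at hij'
      obtain ⟨j, hj, rfl⟩ := hij'
      exact pvPairB_some ls1 ls2 hpre i j (hmem i hi).1 (hmem i hi).2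
        (hmem j hj).1 (hmem j hj).2
  have hB : is_mols_alt ls1 ls2 = pvAdjB (PySem.List.sorted2 L Prod.fst Prod.snd) := by
    rw [is_mols_alt]
    simp only [← hn, ← hrng, hmapM]
  -- tie together: A tests Nodup L; B tests adjacent-distinct of sorted L, i.e. Nodup of sorted L
  rw [hA, hB]
  refine Bool.eq_iff_iff.mpr ?_
  rw [pvScan_isSome L PySem.Set.empty,
      pvAdjB_iff_nodup _ (pv_sorted2_pairwise L),
      (PySem.List.sorted2_perm L Prod.fst Prod.snd false).nodup_iff]
  simp [PySem.Set.empty]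

-- ===== VERDICT (by name: the statement is the Claim_ definition above) =====
theorem is_mols_spec : Claim_equal_is_mols := by
  intro ls1 ls2 _ hpre
  unfold Spec_is_mols
  exact is_mols_spec_aux ls1 ls2 hpre
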